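-- pv_equiv track=rewrite | github.com/QAMPprojetc6/quantum_kernels | scripts/run_experiment.py | _infer_local_tag
-- ===== SOURCE A (Python) =====
-- from typing import Any, Dict, List, Optional, Tuple
--
-- def _infer_local_tag(partitions: List[List[int]]) -> str:
--     sizes = sorted({len(p) for p in partitions})
--     if sizes == [1]:
--         return "local1q"
--     if sizes == [2]:
--         return "local2q"
--     if len(sizes) == 1:
--         return f"local{sizes[0]}q"
--     return "local_mixed"
-- ===== SOURCE B (Python) =====
-- def _infer_local_tag(partitions):
--     size = None
--     for p in partitions:
--         if size is None:
--             size = len(p)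
--         elif len(p) != size:
--             return "local_mixed"
--     if size is None:
--         return "local_mixed"
--     return f"local{size}q"
-- ===== Notes on version B (the rewrite author's own statement) =====
-- stated objective: alternative
-- what changed: B replaces A's build-a-set-then-sort-then-branch pipeline with a single early-exit scan that remembers the first partition size and bails out to 'local_mixed' at the first differing size; the generic format string subsumes A's local1q/local2q branches.
import Mathlib
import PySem

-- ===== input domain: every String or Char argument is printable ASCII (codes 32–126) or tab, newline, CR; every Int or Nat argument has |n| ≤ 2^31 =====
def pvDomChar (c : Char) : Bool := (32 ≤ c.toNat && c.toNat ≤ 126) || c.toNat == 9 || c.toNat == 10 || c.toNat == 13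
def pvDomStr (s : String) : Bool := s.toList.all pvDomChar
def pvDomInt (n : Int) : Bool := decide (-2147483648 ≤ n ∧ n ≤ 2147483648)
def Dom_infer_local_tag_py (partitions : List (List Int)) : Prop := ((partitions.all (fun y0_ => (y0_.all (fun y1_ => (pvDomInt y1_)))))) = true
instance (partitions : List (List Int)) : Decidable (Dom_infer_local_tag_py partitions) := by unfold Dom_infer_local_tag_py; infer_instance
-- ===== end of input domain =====

-- B replaces A's set/sort/branch pipeline with a single early-exit scan over partition sizes (objective: alternative).


-- ===== PORT A =====
-- transliteration of A: sorted({len(p) for p in partitions}), then the branch chain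
def infer_local_tag_py (partitions : List (List Int)) : String :=
  let sizes := PySem.List.sorted (PySem.Set.ofList (partitions.map (fun p => (p.length : Int)))) (fun x => x) false
  if sizes = [(1 : Int)] then "local1q"
  else if sizes = [(2 : Int)] then "local2q"
  else if sizes.length = 1 then "local" ++ PySem.Int.toStr (PySem.List.pyGetD sizes 0 0) ++ "q"
  else "local_mixed"

-- ===== PORT B =====
-- transliteration of B: the for-loop with its `size` variable and early return
def inferScan : List (List Int) → Option Int → String
  | [], none => "local_mixed"
  | [], some s => "local" ++ PySem.Int.toStr s ++ "q"
  | p :: rest, none => inferScan rest (some (p.length : Int))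
  | p :: rest, some s =>
      if (p.length : Int) ≠ s then "local_mixed" else inferScan rest (some s)

def infer_local_tag_py_alt (partitions : List (List Int)) : String :=
  inferScan partitions none

-- ===== PRECONDITION & SPEC =====
def Spec_infer_local_tag_py (partitions : List (List Int)) (out : String) : Prop := out = infer_local_tag_py_alt partitions
instance (partitions : List (List Int)) (out : String) : Decidable (Spec_infer_local_tag_py partitions out) := by unfold Spec_infer_local_tag_py; infer_instance

-- ===== CLAIM =====
def Claim_equal_infer_local_tag_py : Prop := ∀ (partitions : List (List Int)), Dom_infer_local_tag_py partitions → Spec_infer_local_tag_py partitions (infer_local_tag_py partitions)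

-- ===== LEMMAS AND PROOFS =====

-- B's scan with a known size s returns the tag iff every remaining partition has size s
theorem inferScan_some (l : List (List Int)) (s : Int) :
    inferScan l (some s) =
      if l.all (fun p => (p.length : Int) = s) then "local" ++ PySem.Int.toStr s ++ "q"
      else "local_mixed" := by
  induction l with
  | nil => simp [inferScan]
  | cons p rest ih =>
    by_cases h : (p.length : Int) = s
    · simp [inferScan, h, ih]
    · simp [inferScan, h]

-- the size set is the singleton [s] iff all sizes equal s (and the list is nonempty)
theorem ofList_singleton_iff (x : Int) (xs : List Int) (s : Int) :
    PySem.Set.ofList (x :: xs) = [s] ↔ x = s ∧ ∀ y ∈ xs, y = s := by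
  constructor
  · intro h
    have hx : x ∈ PySem.Set.ofList (x :: xs) := by
      rw [PySem.Set.mem_ofList]; simp
    rw [h] at hx; simp at hx
    refine ⟨hx, fun y hy => ?_⟩
    have : y ∈ PySem.Set.ofList (x :: xs) := by
      rw [PySem.Set.mem_ofList]; simp [hy]
    rw [h] at this; simpa using this
  · rintro ⟨hx, hall⟩
    subst hx
    induction xs with
    | nil => simp [PySem.Set.ofList_eq_foldl, List.foldl, PySem.Set.add, PySem.Set.contains]
    | cons y ys ih =>
      have hy : y = x := hall y (by simp)
      subst hy
      have := ih (fun z hz => hall z (by simp [hz]))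
      -- ofList (x :: y :: ys) with y = x : the foldl's Set.add skips the duplicate
      rw [PySem.Set.ofList_eq_foldl] at this ⊢
      simpa [List.foldl, PySem.Set.add, PySem.Set.contains] using this

-- ===== VERDICT =====
theorem infer_local_tag_py_spec : Claim_equal_infer_local_tag_py := by
  intro ps _
  unfold Spec_infer_local_tag_py infer_local_tag_py infer_local_tag_py_alt
  cases ps with
  | nil => decide
  | cons p rest =>
    rw [inferScan, inferScan_some]
    by_cases hall : rest.all (fun q => (q.length : Int) = (p.length : Int))
    · -- all sizes equal: set is the singleton, sorted is itself
      have hset : PySem.Set.ofList ((p :: rest).map (fun q => (q.length : Int))) = [(p.length : Int)] := by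
        rw [List.map_cons, ofList_singleton_iff]
        exact ⟨rfl, by simpa [List.all_eq_true] using hall⟩
      have hs : PySem.List.sorted [(p.length : Int)] (fun x : Int => x) false = [(p.length : Int)] := by
        apply PySem.List.sorted_eq_self_of_pairwise; simp
      simp only [hset, hs, hall, if_pos]
      by_cases h1 : (p.length : Int) = 1
      · rw [h1]; simp; decide
      · by_cases h2 : (p.length : Int) = 2
        · rw [h2]; simp; decide
        · simp [h1, h2, PySem.List.pyGetD]
    · -- a differing size exists: the set has ≥ 2 elements
      have hall' : ¬ ∀ x ∈ rest, x.length = p.length := by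
        intro h; apply hall
        simp only [List.all_eq_true, decide_eq_true_eq]
        intro q hq; exact_mod_cast h q hq
      have hne : ∀ s : Int, PySem.Set.ofList ((p :: rest).map (fun q => (q.length : Int))) ≠ [s] := by
        intro s h
        rw [List.map_cons, ofList_singleton_iff] at h
        obtain ⟨hp, hrest⟩ := h
        apply hall
        simp only [List.all_eq_true]
        intro q hq
        have : (q.length : Int) = s := hrest _ (by simp; exact ⟨q, hq, rfl⟩)
        simp [this, ← hp]
      cases hs : PySem.Set.ofList ((p :: rest).map (fun q => (q.length : Int))) with
      | nil =>
        exfalso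
        have : (p.length : Int) ∈ PySem.Set.ofList ((p :: rest).map (fun q => (q.length : Int))) := by
          rw [PySem.Set.mem_ofList]; simp
        rw [hs] at this; simp at this
      | cons a t =>
        cases t with
        | nil => exact absurd hs (hne a)
        | cons b u =>
          have hl : (PySem.List.sorted (a :: b :: u) (fun x : Int => x) false).length = u.length + 2 := by
            simp [PySem.List.length_sorted]
          have hne1 : PySem.List.sorted (a :: b :: u) (fun x : Int => x) false ≠ [(1 : Int)] := by
            intro hx; rw [hx] at hl; simp at hl
          have hne2 : PySem.List.sorted (a :: b :: u) (fun x : Int => x) false ≠ [(2 : Int)] := by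
            intro hx; rw [hx] at hl; simp at hl
          simp [hne1, hne2, hl, hall']
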